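-- pv_equiv track=rewrite | github.com/hedeqiang/leetcode-1 | python/1207.unique-number-of-occurrences.py | uniqueOccurrences1
-- ===== SOURCE A (Python) =====
-- def uniqueOccurrences1(arr):
--     dt = {}
--     cnts = set()
--     for x in arr:
--         dt[x] = dt.get(x, 0) + 1
--     for x in dt.values():
--         if x in cnts:
--             return False
--         cnts.add(x)
--     return True
-- ===== SOURCE B (Python) =====
-- def uniqueOccurrences1(arr):
--     dt = {}
--     for x in arr:
--         dt[x] = dt.get(x, 0) + 1
--     counts = sorted(dt.values())
--     return all(a != b for a, b in zip(counts, counts[1:]))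
-- ===== Notes on version B (the rewrite author's own statement) =====
-- stated objective: alternative
-- what changed: The set-membership early-exit scan over the occurrence counts is replaced by sorting the counts and checking that no adjacent pair is equal.
import Mathlib
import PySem

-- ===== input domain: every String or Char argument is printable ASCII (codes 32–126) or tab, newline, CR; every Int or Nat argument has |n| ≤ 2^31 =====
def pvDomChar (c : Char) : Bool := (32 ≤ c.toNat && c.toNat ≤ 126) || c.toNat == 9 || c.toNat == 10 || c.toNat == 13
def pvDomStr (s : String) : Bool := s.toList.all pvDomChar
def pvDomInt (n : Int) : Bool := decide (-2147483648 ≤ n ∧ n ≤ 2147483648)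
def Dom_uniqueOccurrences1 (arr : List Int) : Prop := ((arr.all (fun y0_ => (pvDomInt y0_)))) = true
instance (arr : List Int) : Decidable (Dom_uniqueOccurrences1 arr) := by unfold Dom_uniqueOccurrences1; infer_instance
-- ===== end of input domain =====

-- B replaces A's set-membership early-exit scan over the occurrence counts with a
-- sort-then-adjacent-compare pass (alternative decomposition, same result).


-- ===== PORT A =====
-- the second loop of A, with early return False on a repeated count
def uaLoop : List Int → PySem.Set Int → Bool
  | [], _ => true
  | x :: rest, cnts =>
      if PySem.Set.contains cnts x then false
      else uaLoop rest (PySem.Set.add cnts x)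

def uniqueOccurrences1 (arr : List Int) : Bool :=
  let dt := arr.foldl (fun d x => d.insert x (d.getD x 0 + 1)) (PySem.Dict.empty : PySem.Dict Int Int)
  uaLoop dt.values PySem.Set.empty

-- ===== PORT B =====
def uniqueOccurrences1_alt (arr : List Int) : Bool :=
  let dt := arr.foldl (fun d x => d.insert x (d.getD x 0 + 1)) (PySem.Dict.empty : PySem.Dict Int Int)
  let counts := PySem.List.sorted dt.values (fun x => x) false
  (counts.zip counts.tail).all (fun p => p.1 != p.2)

-- ===== PRECONDITION & SPEC =====
def Spec_uniqueOccurrences1 (arr : List Int) (out : Bool) : Prop := out = uniqueOccurrences1_alt arr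
instance (arr : List Int) (out : Bool) : Decidable (Spec_uniqueOccurrences1 arr out) := by unfold Spec_uniqueOccurrences1; infer_instance

-- ===== CLAIM (what is proved, stated in full; the proofs are below) =====
def Claim_equal_uniqueOccurrences1 : Prop := ∀ (arr : List Int), Dom_uniqueOccurrences1 arr → Spec_uniqueOccurrences1 arr (uniqueOccurrences1 arr)

-- ===== LEMMAS AND PROOFS =====

-- A's loop returns True iff the values are pairwise distinct and none is already seen
lemma uaLoop_eq_true_iff (vs : List Int) (cnts : PySem.Set Int) :
    uaLoop vs cnts = true ↔ vs.Nodup ∧ ∀ x ∈ vs, x ∉ cnts := by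
  induction vs generalizing cnts with
  | nil => simp [uaLoop]
  | cons x rest ih =>
      by_cases hx : x ∈ cnts
      · simp [uaLoop, PySem.Set.contains, hx]
      · simp only [uaLoop, PySem.Set.contains]
        rw [if_neg (by simpa using hx)]
        rw [ih]
        constructor
        · rintro ⟨hnd, hmem⟩
          refine ⟨List.nodup_cons.mpr ⟨fun hxr => ?_, hnd⟩, ?_⟩
          · exact (hmem x hxr) (by simp [PySem.Set.mem_add])
          · intro y hy
            rcases List.mem_cons.mp hy with rfl | hy
            · exact hx
            · intro hyc
              exact (hmem y hy) (by simp [PySem.Set.mem_add, hyc])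
        · rintro ⟨hnd, hmem⟩
          rcases List.nodup_cons.mp hnd with ⟨hxr, hnd2⟩
          refine ⟨hnd2, fun y hy => ?_⟩
          rw [PySem.Set.mem_add]
          rintro (hyc | rfl)
          · exact (hmem y (by simp [hy])) hyc
          · exact hxr hy

-- the adjacent-pair scan is the chain of ≠
lemma zip_all_ne_iff_chain (s : List Int) :
    ((s.zip s.tail).all (fun p => p.1 != p.2)) = true ↔ s.IsChain (· ≠ ·) := by
  induction s with
  | nil => simp
  | cons a t ih =>
      cases t with
      | nil => simp
      | cons b u =>
          simp only [List.tail_cons, List.zip_cons_cons, List.all_cons, Bool.and_eq_true,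
            bne_iff_ne, List.isChain_cons_cons]
          rw [and_congr_right_iff]
          intro _
          simpa using ih

-- a ≤-sorted list with distinct neighbours has no duplicates at all
lemma chain_ne_iff_nodup_of_sorted (s : List Int) (hs : s.Pairwise (· ≤ ·)) :
    s.IsChain (· ≠ ·) ↔ s.Nodup := by
  constructor
  · intro hc
    have hlt : s.IsChain (· < ·) := by
      have hle : s.IsChain (· ≤ ·) := hs.isChain
      rw [List.isChain_iff_getElem] at hle hc ⊢
      intro i hi
      exact lt_of_le_of_ne (hle i hi) (hc i hi)
    exact (List.isChain_iff_pairwise.mp hlt).nodup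
  · intro hnd
    exact List.Pairwise.isChain hnd

-- ===== VERDICT (by name: the statement is the Claim_ definition above) =====
theorem uniqueOccurrences1_spec : Claim_equal_uniqueOccurrences1 := by
  intro arr _
  unfold Spec_uniqueOccurrences1 uniqueOccurrences1 uniqueOccurrences1_alt
  simp only []
  set vs := (arr.foldl (fun d x => d.insert x (d.getD x 0 + 1)) (PySem.Dict.empty : PySem.Dict Int Int)).values with hvs
  have hperm : (PySem.List.sorted vs (fun x => x) false).Perm vs := PySem.List.sorted_perm vs _ _
  have hA : uaLoop vs PySem.Set.empty = true ↔ vs.Nodup := by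
    rw [uaLoop_eq_true_iff]
    simp [PySem.Set.empty]
  have hB : ((PySem.List.sorted vs (fun x => x) false).zip
      (PySem.List.sorted vs (fun x => x) false).tail).all (fun p => p.1 != p.2) = true ↔ vs.Nodup := by
    rw [zip_all_ne_iff_chain,
      chain_ne_iff_nodup_of_sorted _ (by simpa using PySem.List.sorted_pairwise vs (fun x => x))]
    exact hperm.nodup_iff
  show uaLoop vs PySem.Set.empty = ((PySem.List.sorted vs (fun x => x) false).zip
      (PySem.List.sorted vs (fun x => x) false).tail).all (fun p => p.1 != p.2)
  rw [Bool.eq_iff_iff]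
  exact hA.trans hB.symm
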